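-- pv_equiv track=rewrite | github.com/kimyenac/Algorithm | 프로그래머스/lv0/120956. 옹알이 （1）/옹알이 （1）.py | solution
-- ===== SOURCE A (Python) =====
-- from itertools import permutations
--
-- def solution(babbling):
--     answer = 0
--
--     words = []
--     array = ["aya", "ye", "woo", "ma"]
--
--     for i in range(1, len(array)+1):
--         for j in permutations(array, i):
--             words.append(''.join(j))
--
--     for word in babbling:
--         if (word in words):
--             answer += 1
--
--     return answer
-- ===== SOURCE B (Python) =====
-- def solution(babbling):
--     count = 0
--     for word in babbling:
--         avail = ["aya", "ye", "woo", "ma"]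
--         i = 0
--         ok = True
--         while i < len(word):
--             for t in avail:
--                 if word.startswith(t, i):
--                     avail.remove(t)
--                     i += len(t)
--                     break
--             else:
--                 ok = False
--                 break
--         if ok and word:
--             count += 1
--     return count
-- ===== Notes on version B (the rewrite author's own statement) =====
-- stated objective: simpler
-- what changed: Instead of enumerating all 64 permutation concatenations of the four syllables and testing list membership, B parses each word in one greedy pass, consuming a matching syllable prefix and removing it from the available list (greedy is exact because the four syllables start with distinct letters).
import Mathlib
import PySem

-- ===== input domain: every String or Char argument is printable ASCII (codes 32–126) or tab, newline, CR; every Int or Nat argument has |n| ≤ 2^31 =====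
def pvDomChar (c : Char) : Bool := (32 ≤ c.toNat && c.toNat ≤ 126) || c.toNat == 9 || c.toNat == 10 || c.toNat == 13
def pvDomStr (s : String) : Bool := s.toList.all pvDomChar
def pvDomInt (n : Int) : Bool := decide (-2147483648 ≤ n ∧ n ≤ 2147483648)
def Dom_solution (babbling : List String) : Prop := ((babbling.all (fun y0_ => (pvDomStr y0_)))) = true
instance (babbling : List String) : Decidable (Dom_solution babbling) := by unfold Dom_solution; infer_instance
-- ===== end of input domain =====

-- B is a simpler greedy single-pass parser per word; equivalence of the return value (A mutates nothing observable).

-- ===== PORT A =====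
-- itertools.permutations(xs, n) for distinct xs, in itertools' order:
-- pick each element in list order, then permute the rest.
def permsA : Nat → List String → List (List String)
  | 0, _ => [[]]
  | n + 1, xs => xs.flatMap (fun x => (permsA n (xs.erase x)).map (fun p => x :: p))

def solution (babbling : List String) : Int :=
  let array : List String := ["aya", "ye", "woo", "ma"]
  let words : List String :=
    (PySem.List.pyRange 1 ((array.length : Int) + 1) 1).flatMap
      (fun i => (permsA i.toNat array).map String.join)
  babbling.foldl (fun answer word => if word ∈ words then answer + 1 else answer) 0

-- ===== PORT B =====
-- the inner while/for loop of Source B: consume a matching available syllable, or fail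
def greedy (s : List Char) (avail : List String) : Bool :=
  match s with
  | [] => true
  | c :: rest =>
    match h : avail.find? (fun t => t.toList.isPrefixOf (c :: rest)) with
    | none => false
    | some t => greedy ((c :: rest).drop t.toList.length) (avail.erase t)
termination_by avail.length
decreasing_by
  have hm := List.mem_of_find?_eq_some h
  have h1 := List.length_erase_of_mem hm
  have h2 := List.length_pos_of_mem hm
  omega

def solution_alt (babbling : List String) : Int :=
  babbling.foldl
    (fun count word =>
      if word ≠ "" ∧ greedy word.toList ["aya", "ye", "woo", "ma"] = true then count + 1
      else count) 0

-- ===== PRECONDITION & SPEC =====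
def Spec_solution (babbling : List String) (out : Int) : Prop := out = solution_alt babbling
instance (babbling : List String) (out : Int) : Decidable (Spec_solution babbling out) := by unfold Spec_solution; infer_instance

-- ===== CLAIM (what is proved, stated in full; the proofs are below) =====
def Claim_equal_solution : Prop := ∀ (babbling : List String), Dom_solution babbling → Spec_solution babbling (solution babbling)

-- ===== LEMMAS AND PROOFS =====

-- tokens of the puzzle
def pvToks : List String := ["aya", "ye", "woo", "ma"]

theorem toks_ne (t : String) (ht : t ∈ pvToks) : t.toList ≠ [] := by
  fin_cases ht <;> decide

theorem toks_head (t t' : String) (ht : t ∈ pvToks) (ht' : t' ∈ pvToks)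
    (h : t.toList.head? = t'.toList.head?) : t = t' := by
  fin_cases ht <;> fin_cases ht' <;> simp_all <;> rfl

-- the only member of avail that is a prefix of t.toList ++ r is t itself
theorem prefix_unique (avail : List String) (hs : avail ⊆ pvToks) (t t' : String)
    (ht : t ∈ pvToks) (ht' : t' ∈ avail) (r : List Char)
    (hp : t'.toList.isPrefixOf (t.toList ++ r) = true) : t' = t := by
  apply toks_head t' t (hs ht') ht
  have hp' : t'.toList <+: t.toList ++ r := by
    simpa [List.isPrefixOf_iff_prefix] using hp
  have hne := toks_ne t ht
  have hne' := toks_ne t' (hs ht')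
  obtain ⟨u, hu⟩ := hp'
  cases e : t.toList with
  | nil => exact absurd e hne
  | cons a as =>
    cases e' : t'.toList with
    | nil => exact absurd e' hne'
    | cons b bs =>
      rw [e, e'] at hu
      simp at hu ⊢
      exact hu.1

theorem find?_eq_some_of_unique (avail : List String) (t : String)
    (p : String → Bool) (hmem : t ∈ avail) (hpt : p t = true)
    (huniq : ∀ t' ∈ avail, p t' = true → t' = t) :
    avail.find? p = some t := by
  induction avail with
  | nil => cases hmem
  | cons a l ih =>
    by_cases hpa : p a = true
    · have hat : a = t := huniq a List.mem_cons_self hpa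
      subst hat
      exact List.find?_cons_of_pos hpa
    · have hta : t ≠ a := fun e => hpa (e ▸ hpt)
      have hml : t ∈ l := by
        rcases List.mem_cons.mp hmem with h | h
        · exact absurd h hta
        · exact h
      rw [List.find?_cons_of_neg (by simpa using hpa)]
      exact ih hml (fun t' h' => huniq t' (List.mem_cons_of_mem _ h'))

-- main characterisation: greedy accepts s with avail ⊆ pvToks iff s is the
-- concatenation of some permutation of a sub-multiset of avail
theorem greedy_iff (k : Nat) : ∀ (avail : List String), avail.length ≤ k → avail ⊆ pvToks →
    ∀ s : List Char,
    (greedy s avail = true ↔ ∃ n, n ≤ avail.length ∧ ∃ p ∈ permsA n avail, s = (p.map String.toList).flatten) := by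
  induction k with
  | zero =>
    intro avail hk hsub s
    have : avail = [] := List.eq_nil_of_length_eq_zero (Nat.le_zero.mp hk)
    subst this
    cases s with
    | nil => simp [greedy, permsA]
    | cons c rest =>
      constructor
      · intro h; simp [greedy, List.find?] at h
      · rintro ⟨n, hn, p, hp, hs⟩
        have hn0 : n = 0 := Nat.le_zero.mp hn
        subst hn0
        simp [permsA] at hp
        subst hp; simp at hs
  | succ k ih =>
    intro avail hk hsub s
    cases s with
    | nil =>
      constructor
      · intro _; exact ⟨0, Nat.zero_le _, [], by simp [permsA], by simp⟩
      · intro _; simp [greedy]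
    | cons c rest =>
      constructor
      · intro h
        rw [greedy] at h
        split at h
        · exact absurd h (by simp)
        · rename_i t hf
          have htm : t ∈ avail := List.mem_of_find?_eq_some hf
          have hpre : t.toList.isPrefixOf (c :: rest) = true := by
            have := List.find?_some hf; simpa using this
          have hlen : (avail.erase t).length ≤ k := by
            have := List.length_erase_of_mem htm
            omega
          have hsub' : avail.erase t ⊆ pvToks :=
            fun x hx => hsub (List.mem_of_mem_erase hx)
          obtain ⟨n, hn, p, hp, hs⟩ :=
            (ih (avail.erase t) hlen hsub' _).mp h
          refine ⟨n + 1, ?_, t :: p, ?_, ?_⟩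
          · have := List.length_erase_of_mem htm
            have h1 : 1 ≤ avail.length := List.length_pos_of_mem htm
            omega
          · simp only [permsA, List.mem_flatMap]
            exact ⟨t, htm, List.mem_map.mpr ⟨p, hp, rfl⟩⟩
          · have hpre' : t.toList <+: (c :: rest) := by
              simpa [List.isPrefixOf_iff_prefix] using hpre
            obtain ⟨u, hu⟩ := hpre'
            rw [← hu] at hs ⊢
            rw [List.drop_left] at hs
            simp [hs]
      · rintro ⟨n, hn, p, hp, hs⟩
        cases n with
        | zero =>
          simp [permsA] at hp
          subst hp; simp at hs
        | succ n =>
          simp only [permsA, List.mem_flatMap, List.mem_map] at hp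
          obtain ⟨t, htm, q, hq, hpq⟩ := hp
          subst hpq
          simp only [List.map_cons, List.flatten_cons] at hs
          set r := (q.map String.toList).flatten with hr
          have hfind : (List.find? (fun t' => t'.toList.isPrefixOf (c :: rest)) avail) = some t := by
            apply find?_eq_some_of_unique avail t _ htm
            · rw [hs]
              exact List.isPrefixOf_iff_prefix.mpr ⟨r, rfl⟩
            · intro t' ht' hp'
              rw [hs] at hp'
              exact prefix_unique avail hsub t t' (hsub htm) ht' r hp'
          rw [greedy, hfind]
          have hlen : (avail.erase t).length ≤ k := by
            have := List.length_erase_of_mem htm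
            omega
          have hsub' : avail.erase t ⊆ pvToks :=
            fun x hx => hsub (List.mem_of_mem_erase hx)
          apply (ih (avail.erase t) hlen hsub' _).mpr
          refine ⟨n, ?_, q, hq, ?_⟩
          · have := List.length_erase_of_mem htm
            have h1 : 1 ≤ avail.length := List.length_pos_of_mem htm
            omega
          · rw [hs, List.drop_left]

-- String.join vs flatten of toLists
theorem toList_foldl_append (l : List String) : ∀ a : String,
    (l.foldl (fun r s => r ++ s) a).toList = a.toList ++ (l.map String.toList).flatten := by
  induction l with
  | nil => intro a; simp
  | cons x xs ih => intro a; simp [List.foldl, ih]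

theorem toList_join (p : List String) : (String.join p).toList = (p.map String.toList).flatten := by
  simpa [String.join] using toList_foldl_append p ""

-- membership in A's word list iff B's test
theorem word_iff (w : String) :
    (w ∈ (PySem.List.pyRange 1 ((([("aya":String), "ye", "woo", "ma"]).length : Int) + 1) 1).flatMap
      (fun i => (permsA i.toNat ["aya", "ye", "woo", "ma"]).map String.join))
    ↔ (w ≠ "" ∧ greedy w.toList ["aya", "ye", "woo", "ma"] = true) := by
  have hR : PySem.List.pyRange 1 ((([("aya":String), "ye", "woo", "ma"]).length : Int) + 1) 1 = [1, 2, 3, 4] := by decide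
  rw [hR]
  have hG := greedy_iff 4 ["aya", "ye", "woo", "ma"] (by decide) (by intro x hx; exact hx) w.toList
  constructor
  · intro h
    simp only [List.mem_flatMap, List.mem_map] at h
    obtain ⟨i, hi, p, hp, hw⟩ := h
    -- w is join of a nonempty permutation: nonempty and greedy accepts
    have hwl : w.toList = (p.map String.toList).flatten := by
      rw [← hw, toList_join]
    have hplen : ∃ n, n ≤ 4 ∧ i.toNat = n ∧ p ∈ permsA i.toNat ["aya", "ye", "woo", "ma"] := by
      fin_cases hi <;> exact ⟨_, by decide, rfl, hp⟩
    have hacc : greedy w.toList ["aya", "ye", "woo", "ma"] = true := by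
      apply hG.mpr
      obtain ⟨n, hn4, hin, hp'⟩ := hplen
      exact ⟨n, by simpa using hn4, p, hin ▸ hp', hwl⟩
    refine ⟨?_, hacc⟩
    -- nonemptiness: p = t :: q with t a token, and tokens are nonempty
    intro he
    have hie : ∃ m : Nat, i.toNat = m + 1 := by fin_cases hi <;> exact ⟨_, rfl⟩
    obtain ⟨m, him⟩ := hie
    rw [him] at hp
    simp only [permsA, List.mem_flatMap, List.mem_map] at hp
    obtain ⟨t, htm, q, _, hpq⟩ := hp
    have : w.toList = [] := by rw [he]; rfl
    rw [hwl, ← hpq] at this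
    simp only [List.map_cons, List.flatten_cons, List.append_eq_nil_iff] at this
    exact toks_ne t (by simpa [pvToks] using htm) this.1
  · rintro ⟨hne, hacc⟩
    obtain ⟨n, hn, p, hp, hs⟩ := hG.mp hacc
    cases n with
    | zero =>
      simp [permsA] at hp
      subst hp
      simp at hs
      exact absurd (String.ext (by simpa using hs)) hne
    | succ m =>
      simp only [List.mem_flatMap, List.mem_map]
      refine ⟨(m : Int) + 1, ?_, p, ?_, ?_⟩
      · have hm4 : m + 1 ≤ 4 := by simpa using hn
        have hm3 : m ≤ 3 := by omega
        interval_cases m <;> decide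
      · have : ((m : Int) + 1).toNat = m + 1 := by omega
        rw [this]; exact hp
      · apply String.ext
        rw [toList_join, hs]

-- fold equality
theorem fold_eq (babbling : List String) (a : Int)
    (w : List String)
    (hw : ∀ x, (x ∈ w) ↔ (x ≠ "" ∧ greedy x.toList ["aya", "ye", "woo", "ma"] = true)) :
    babbling.foldl (fun answer word => if word ∈ w then answer + 1 else answer) a
    = babbling.foldl (fun count word =>
        if word ≠ "" ∧ greedy word.toList ["aya", "ye", "woo", "ma"] = true then count + 1
        else count) a := by
  induction babbling generalizing a with
  | nil => rfl
  | cons x xs ih =>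
    simp only [List.foldl]
    rw [show (if x ∈ w then a + 1 else a) = (if x ≠ "" ∧ greedy x.toList ["aya", "ye", "woo", "ma"] = true then a + 1 else a) by
      by_cases h : x ∈ w
      · rw [if_pos h, if_pos ((hw x).mp h)]
      · rw [if_neg h, if_neg (fun hc => h ((hw x).mpr hc))]]
    exact ih _

-- ===== VERDICT (by name: the statement is the Claim_ definition above) =====
theorem solution_spec : Claim_equal_solution := by
  intro babbling _
  unfold Spec_solution solution solution_alt
  exact fold_eq babbling 0 _ word_iff
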